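-- pv_equiv track=rewrite | github.com/xiaoyao0512/autograph | drl-LOREICX/lore_utility.py | get_snapshot_from_code
-- ===== SOURCE A (Python) =====
-- def get_snapshot_from_code(code,loop_idx=None):
--     ''' take snapshot of the loop code and encapsulate
--      in a function declaration so the parser can output
--      AST tree.'''
--     found = False
--     new_code = []
--     for line in code:
--         if 'void loop()' in line:
--             found = True
--             line = "void loop(ret)\n"
--         if found:
--             new_code.append(line)
--     return new_code
-- ===== SOURCE B (Python) =====
-- def get_snapshot_from_code(code, loop_idx=None):
--     idx = next((i for i, l in enumerate(code) if 'void loop()' in l), None)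
--     if idx is None:
--         return []
--     return ["void loop(ret)\n" if 'void loop()' in l else l for l in code[idx:]]
-- ===== Notes on version B (the rewrite author's own statement) =====
-- stated objective: alternative
-- what changed: Replaces A's single flag-driven accumulator loop by a two-phase locate-then-transform structure: find the first marker line's index, then map a per-line replacement over the tail slice.
import Mathlib
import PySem

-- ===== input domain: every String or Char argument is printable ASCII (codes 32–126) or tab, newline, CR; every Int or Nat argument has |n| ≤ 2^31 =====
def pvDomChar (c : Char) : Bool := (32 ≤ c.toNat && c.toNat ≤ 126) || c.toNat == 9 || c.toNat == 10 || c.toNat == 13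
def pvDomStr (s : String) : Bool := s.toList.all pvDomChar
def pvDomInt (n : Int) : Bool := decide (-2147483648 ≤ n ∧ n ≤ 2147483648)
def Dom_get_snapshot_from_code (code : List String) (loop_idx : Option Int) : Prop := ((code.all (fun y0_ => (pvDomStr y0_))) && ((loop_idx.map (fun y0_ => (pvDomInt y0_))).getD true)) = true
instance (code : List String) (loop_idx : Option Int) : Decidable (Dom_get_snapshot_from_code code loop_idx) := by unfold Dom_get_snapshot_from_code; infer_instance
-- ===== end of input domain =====

-- B replaces A's flag-driven accumulator loop with a locate-then-transform decomposition (find first marker index, then map a per-line replacement over the tail); same cost, alternative structure.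


-- ===== PORT A =====
-- A: flag-driven accumulator loop over the lines.
def pvStepA (st : Bool × List String) (line : String) : Bool × List String :=
  let found := if PySem.Str.isIn "void loop()" line then true else st.1
  let line' := if PySem.Str.isIn "void loop()" line then "void loop(ret)\n" else line
  (found, if found then st.2 ++ [line'] else st.2)

def get_snapshot_from_code (code : List String) (_loop_idx : Option Int) : List String :=
  (code.foldl pvStepA (false, [])).2

-- ===== PORT B =====
-- B: locate the first marker line, then map a per-line replacement over the tail.
def pvRepl (line : String) : String :=
  if PySem.Str.isIn "void loop()" line then "void loop(ret)\n" else line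

def get_snapshot_from_code_alt (code : List String) (_loop_idx : Option Int) : List String :=
  match code.findIdx? (fun l => PySem.Str.isIn "void loop()" l) with
  | none => []
  | some i => (code.drop i).map pvRepl

-- ===== PRECONDITION & SPEC =====
def Spec_get_snapshot_from_code (code : List String) (loop_idx : Option Int) (out : List String) : Prop := out = get_snapshot_from_code_alt code loop_idx
instance (code : List String) (loop_idx : Option Int) (out : List String) : Decidable (Spec_get_snapshot_from_code code loop_idx out) := by unfold Spec_get_snapshot_from_code; infer_instance

-- ===== CLAIM (what is proved, stated in full; the proofs are below) =====
def Claim_equal_get_snapshot_from_code : Prop := ∀ (code : List String) (loop_idx : Option Int), Dom_get_snapshot_from_code code loop_idx → Spec_get_snapshot_from_code code loop_idx (get_snapshot_from_code code loop_idx)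

-- ===== LEMMAS AND PROOFS =====

-- Once the flag is set, A appends the replacement of every remaining line.
theorem pv_foldl_true (ls : List String) (acc : List String) :
    (ls.foldl pvStepA (true, acc)).2 = acc ++ ls.map pvRepl := by
  induction ls generalizing acc with
  | nil => simp
  | cons l t ih =>
      simp only [List.foldl_cons, List.map_cons, pvStepA, pvRepl]
      by_cases h : PySem.Str.isIn "void loop()" l
      · simp [ih, List.append_assoc]
      · simp [ih, List.append_assoc]

-- While the flag is unset, A's result is B's result on the remaining lines.
theorem pv_foldl_false (ls : List String) :
    (ls.foldl pvStepA (false, [])).2 = get_snapshot_from_code_alt ls none := by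
  induction ls with
  | nil => simp [get_snapshot_from_code_alt]
  | cons l t ih =>
      simp only [List.foldl_cons, pvStepA]
      by_cases h : PySem.Str.isIn "void loop()" l
      · simp only [h, if_true, List.nil_append]
        rw [pv_foldl_true]
        simp only [get_snapshot_from_code_alt, List.findIdx?_cons]
        rw [h]
        simp only [if_true, List.drop_zero, List.map_cons, pvRepl, h, List.singleton_append]
      · rw [Bool.not_eq_true] at h
        simp only [h, Bool.false_eq_true, if_false]
        rw [ih]
        simp only [get_snapshot_from_code_alt, List.findIdx?_cons]
        rw [h]
        simp only [if_false, Bool.false_eq_true]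
        cases hf : t.findIdx? (fun l => PySem.Str.isIn "void loop()" l) <;> simp

-- ===== VERDICT (by name: the statement is the Claim_ definition above) =====
theorem get_snapshot_from_code_spec : Claim_equal_get_snapshot_from_code := by
  intro code loop_idx _
  show get_snapshot_from_code code loop_idx = get_snapshot_from_code_alt code loop_idx
  unfold get_snapshot_from_code
  rw [pv_foldl_false]
  rfl
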